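-- pv_equiv track=rewrite | github.com/Adarshb2000/coding | DELISH.py | delish
-- ===== SOURCE A (Python) =====
-- def delish(numbers):
--     n = len(numbers)
--
--     dp = [[0 for _ in range(n)] for _ in range(n)]
--     max_ = numbers[0]
--     min_ = numbers[0]
--
--     for j in range(n):
--         for i in range(j + 1):
--             dp[i][j] += numbers[j] + dp[i][j - 1]
--             if not (i == 0 and j == n - 1):
--                 if dp[i][j] > max_:
--                     max_ = dp[i][j]
--             if dp[i][j] < min_:
--                 min_ = dp[i][j]
--
--     return max_ - min_
-- ===== SOURCE B (Python) =====
-- def delish(numbers):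
--     if len(numbers) == 1:
--         return 0
--
--     def kadane_max(arr):
--         best = cur = arr[0]
--         for x in arr[1:]:
--             cur = max(x, cur + x)
--             best = max(best, cur)
--         return best
--
--     def kadane_min(arr):
--         best = cur = arr[0]
--         for x in arr[1:]:
--             cur = min(x, cur + x)
--             best = min(best, cur)
--         return best
--
--     hi = max(kadane_max(numbers[1:]), kadane_max(numbers[:-1]))
--     lo = kadane_min(numbers)
--     return hi - lo
-- ===== Notes on version B (the rewrite author's own statement) =====
-- stated objective: faster
-- what changed: Replaces the O(n^2) DP table enumerating every subarray sum with three O(n) Kadane scans: max-Kadane over numbers[1:] and numbers[:-1] (which together cover every subarray except the full one) minus min-Kadane over the whole list.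
import Mathlib
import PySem

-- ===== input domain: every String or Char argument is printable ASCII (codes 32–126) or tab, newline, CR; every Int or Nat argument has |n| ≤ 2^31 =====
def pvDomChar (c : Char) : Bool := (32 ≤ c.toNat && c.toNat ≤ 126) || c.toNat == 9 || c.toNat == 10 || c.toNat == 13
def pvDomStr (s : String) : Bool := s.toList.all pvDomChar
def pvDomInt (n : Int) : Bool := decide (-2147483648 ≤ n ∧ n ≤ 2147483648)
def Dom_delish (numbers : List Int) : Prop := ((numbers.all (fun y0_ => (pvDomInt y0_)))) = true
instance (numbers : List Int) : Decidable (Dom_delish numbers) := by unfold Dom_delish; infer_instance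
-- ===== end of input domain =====

-- B replaces A's O(n^2) subarray-sum table with three linear Kadane scans (measured asymptotic speed-up).

-- ===== PORT A =====
-- helper: the body of A's inner loop (dp row update + running max/min), transliterated
def delishInner (n : Nat) (numbers : List Int) (j : Nat)
    (st : List (List Int) × Int × Int) (i : Nat) : List (List Int) × Int × Int :=
  let dp := st.1
  let row := dp.getD i []
  -- dp[i][j] += numbers[j] + dp[i][j-1]  (j-1 may be -1: Python wraps; pyGetD is exact, indices are in range)
  let v := PySem.List.pyGetD row (j : Int) 0 + (PySem.List.pyGetD numbers (j : Int) 0 + PySem.List.pyGetD row ((j : Int) - 1) 0)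
  (dp.set i (row.set j v),
   if ¬(i = 0 ∧ j = n - 1) then (if v > st.2.1 then v else st.2.1) else st.2.1,
   if v < st.2.2 then v else st.2.2)

def delish (numbers : List Int) : Int :=
  let n := numbers.length
  let dp0 : List (List Int) := (List.range n).map fun _ => (List.range n).map fun _ => (0 : Int)
  let x0 := PySem.List.pyGetD numbers 0 0
  let st := (List.range n).foldl
    (fun st j => (List.range (j + 1)).foldl (delishInner n numbers j) st) (dp0, x0, x0)
  st.2.1 - st.2.2

-- ===== PORT B =====
-- helper: Kadane maximum-subarray scan (B's kadane_max)
def kadMax (arr : List Int) : Int :=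
  match arr with
  | [] => 0   -- unreachable under Pre_: B's Python raises on []
  | a :: rest =>
    (rest.foldl (fun (bc : Int × Int) x =>
      let c := max x (bc.2 + x)
      (max bc.1 c, c)) (a, a)).1

-- helper: Kadane minimum-subarray scan (B's kadane_min)
def kadMin (arr : List Int) : Int :=
  match arr with
  | [] => 0   -- unreachable under Pre_
  | a :: rest =>
    (rest.foldl (fun (bc : Int × Int) x =>
      let c := min x (bc.2 + x)
      (min bc.1 c, c)) (a, a)).1

def delish_alt (numbers : List Int) : Int :=
  if numbers.length = 1 then 0
  else max (kadMax numbers.tail) (kadMax numbers.dropLast) - kadMin numbers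

-- ===== PRECONDITION & SPEC =====
-- Pre_ excludes only the empty list, on which A raises IndexError (numbers[0]).
def Pre_delish (numbers : List Int) : Prop := numbers ≠ []
instance (numbers : List Int) : Decidable (Pre_delish numbers) := by unfold Pre_delish; infer_instance
def pvWitness_delish : List Int := [1, -2, 3]

def Spec_delish (numbers : List Int) (out : Int) : Prop := out = delish_alt numbers
instance (numbers : List Int) (out : Int) : Decidable (Spec_delish numbers out) := by unfold Spec_delish; infer_instance

-- ===== CLAIM (what is proved, stated in full; the proofs are below) =====
def Claim_equal_delish : Prop := ∀ (numbers : List Int), Dom_delish numbers → Pre_delish numbers → Spec_delish numbers (delish numbers)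

-- ===== LEMMAS AND PROOFS =====

-- sum of the subarray P[i..j] (inclusive)
def S (P : List Int) (i j : Nat) : Int := ((P.drop i).take (j + 1 - i)).sum

-- v is the sum of a nonempty suffix of l
def SufS (l : List Int) (v : Int) : Prop := ∃ k, k < l.length ∧ v = (l.drop k).sum

-- v is the sum of a nonempty contiguous subarray of l
def SubS (l : List Int) (v : Int) : Prop :=
  ∃ i m, 1 ≤ m ∧ i + m ≤ l.length ∧ v = ((l.drop i).take m).sum

-- the dp matrix after columns < j are filled and, in column j, rows < i0
def dpAt (P : List Int) (j i0 : Nat) : List (List Int) :=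
  (List.range P.length).map fun a => (List.range P.length).map fun b =>
    if (b < j ∨ (b = j ∧ a < i0)) ∧ a ≤ b then S P a b else 0

-- the candidates A's running max has seen so far
def MxSet (P : List Int) (j i0 : Nat) (v : Int) : Prop :=
  v = PySem.List.pyGetD P 0 0 ∨
    ∃ a b, a ≤ b ∧ (b < j ∨ (b = j ∧ a < i0)) ∧ ¬(a = 0 ∧ b = P.length - 1) ∧ v = S P a b

-- the candidates A's running min has seen so far
def MnSet (P : List Int) (j i0 : Nat) (v : Int) : Prop :=
  v = PySem.List.pyGetD P 0 0 ∨
    ∃ a b, a ≤ b ∧ (b < j ∨ (b = j ∧ a < i0)) ∧ v = S P a b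

def InvA (P : List Int) (j i0 : Nat) (st : List (List Int) × Int × Int) : Prop :=
  st.1 = dpAt P j i0 ∧
  MxSet P j i0 st.2.1 ∧ (∀ v, MxSet P j i0 v → v ≤ st.2.1) ∧
  MnSet P j i0 st.2.2 ∧ (∀ v, MnSet P j i0 v → st.2.2 ≤ v)

lemma sufS_append (pre : List Int) (x v : Int) :
    SufS (pre ++ [x]) v ↔ v = x ∨ ∃ w, SufS pre w ∧ v = w + x := by
  constructor
  · rintro ⟨k, hk, rfl⟩
    simp only [List.length_append, List.length_cons, List.length_nil] at hk
    by_cases h : k < pre.length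
    · right
      exact ⟨(pre.drop k).sum, ⟨k, h, rfl⟩, by
        rw [List.drop_append_of_le_length (Nat.le_of_lt h)]; simp⟩
    · left
      have hk' : k = pre.length := by omega
      subst hk'
      rw [List.drop_append_of_le_length (le_refl _)]
      simp
  · rintro (rfl | ⟨w, ⟨k, hk, rfl⟩, rfl⟩)
    · refine ⟨pre.length, by simp, ?_⟩
      rw [List.drop_append_of_le_length (le_refl _)]
      simp
    · refine ⟨k, by simp; omega, ?_⟩
      rw [List.drop_append_of_le_length (Nat.le_of_lt hk)]
      simp

lemma subS_append (pre : List Int) (x v : Int) :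
    SubS (pre ++ [x]) v ↔ SubS pre v ∨ SufS (pre ++ [x]) v := by
  constructor
  · rintro ⟨i, m, hm, hlen, rfl⟩
    simp only [List.length_append, List.length_cons, List.length_nil] at hlen
    by_cases h : i + m ≤ pre.length
    · left
      refine ⟨i, m, hm, h, ?_⟩
      rw [List.drop_append_of_le_length (by omega),
        List.take_append_of_le_length (by simp [List.length_drop]; omega)]
    · right
      refine ⟨i, by simp; omega, ?_⟩
      rw [List.take_of_length_le (by simp; omega)]
  · rintro (⟨i, m, hm, hlen, rfl⟩ | ⟨k, hk, rfl⟩)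
    · refine ⟨i, m, hm, by simp; omega, ?_⟩
      rw [List.drop_append_of_le_length (by omega),
        List.take_append_of_le_length (by simp [List.length_drop]; omega)]
    · refine ⟨k, (pre ++ [x]).length - k, by omega, by omega, ?_⟩
      rw [List.take_of_length_le (by simp [List.length_drop])]

lemma kadMax_fold (rest : List Int) : ∀ (pre : List Int) (b c : Int),
    SufS pre c → (∀ v, SufS pre v → v ≤ c) →
    SubS pre b → (∀ v, SubS pre v → v ≤ b) →
    (SufS (pre ++ rest) ((rest.foldl (fun (bc : Int × Int) x =>
        let c := max x (bc.2 + x); (max bc.1 c, c)) (b, c)).2) ∧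
     (∀ v, SufS (pre ++ rest) v → v ≤ (rest.foldl (fun (bc : Int × Int) x =>
        let c := max x (bc.2 + x); (max bc.1 c, c)) (b, c)).2) ∧
     SubS (pre ++ rest) ((rest.foldl (fun (bc : Int × Int) x =>
        let c := max x (bc.2 + x); (max bc.1 c, c)) (b, c)).1) ∧
     (∀ v, SubS (pre ++ rest) v → v ≤ (rest.foldl (fun (bc : Int × Int) x =>
        let c := max x (bc.2 + x); (max bc.1 c, c)) (b, c)).1)) := by
  induction rest with
  | nil =>
    intro pre b c hc hcu hb hbu
    simpa using ⟨hc, hcu, hb, hbu⟩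
  | cons x rest ih =>
    intro pre b c hc hcu hb hbu
    have hc' : SufS (pre ++ [x]) (max x (c + x)) := by
      rcases max_choice x (c + x) with h | h <;> rw [h]
      · exact (sufS_append pre x x).2 (Or.inl rfl)
      · exact (sufS_append pre x _).2 (Or.inr ⟨c, hc, rfl⟩)
    have hcu' : ∀ v, SufS (pre ++ [x]) v → v ≤ max x (c + x) := by
      intro v hv
      rcases (sufS_append pre x v).1 hv with rfl | ⟨w, hw, rfl⟩
      · exact le_max_left _ _
      · exact le_trans (by have := hcu w hw; omega) (le_max_right _ _)
    have hb' : SubS (pre ++ [x]) (max b (max x (c + x))) := by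
      rcases max_choice b (max x (c + x)) with h | h <;> rw [h]
      · exact (subS_append pre x b).2 (Or.inl hb)
      · exact (subS_append pre x _).2 (Or.inr hc')
    have hbu' : ∀ v, SubS (pre ++ [x]) v → v ≤ max b (max x (c + x)) := by
      intro v hv
      rcases (subS_append pre x v).1 hv with h | h
      · exact le_trans (hbu v h) (le_max_left _ _)
      · exact le_trans (hcu' v h) (le_max_right _ _)
    have h := ih (pre ++ [x]) (max b (max x (c + x))) (max x (c + x)) hc' hcu' hb' hbu'
    simpa [List.append_assoc] using h

lemma kadMin_fold (rest : List Int) : ∀ (pre : List Int) (b c : Int),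
    SufS pre c → (∀ v, SufS pre v → c ≤ v) →
    SubS pre b → (∀ v, SubS pre v → b ≤ v) →
    (SufS (pre ++ rest) ((rest.foldl (fun (bc : Int × Int) x =>
        let c := min x (bc.2 + x); (min bc.1 c, c)) (b, c)).2) ∧
     (∀ v, SufS (pre ++ rest) v → (rest.foldl (fun (bc : Int × Int) x =>
        let c := min x (bc.2 + x); (min bc.1 c, c)) (b, c)).2 ≤ v) ∧
     SubS (pre ++ rest) ((rest.foldl (fun (bc : Int × Int) x =>
        let c := min x (bc.2 + x); (min bc.1 c, c)) (b, c)).1) ∧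
     (∀ v, SubS (pre ++ rest) v → (rest.foldl (fun (bc : Int × Int) x =>
        let c := min x (bc.2 + x); (min bc.1 c, c)) (b, c)).1 ≤ v)) := by
  induction rest with
  | nil =>
    intro pre b c hc hcu hb hbu
    simpa using ⟨hc, hcu, hb, hbu⟩
  | cons x rest ih =>
    intro pre b c hc hcu hb hbu
    have hc' : SufS (pre ++ [x]) (min x (c + x)) := by
      rcases min_choice x (c + x) with h | h <;> rw [h]
      · exact (sufS_append pre x x).2 (Or.inl rfl)
      · exact (sufS_append pre x _).2 (Or.inr ⟨c, hc, rfl⟩)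
    have hcu' : ∀ v, SufS (pre ++ [x]) v → min x (c + x) ≤ v := by
      intro v hv
      rcases (sufS_append pre x v).1 hv with rfl | ⟨w, hw, rfl⟩
      · exact min_le_left _ _
      · exact le_trans (min_le_right _ _) (by have := hcu w hw; omega)
    have hb' : SubS (pre ++ [x]) (min b (min x (c + x))) := by
      rcases min_choice b (min x (c + x)) with h | h <;> rw [h]
      · exact (subS_append pre x b).2 (Or.inl hb)
      · exact (subS_append pre x _).2 (Or.inr hc')
    have hbu' : ∀ v, SubS (pre ++ [x]) v → min b (min x (c + x)) ≤ v := by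
      intro v hv
      rcases (subS_append pre x v).1 hv with h | h
      · exact le_trans (min_le_left _ _) (hbu v h)
      · exact le_trans (min_le_right _ _) (hcu' v h)
    have h := ih (pre ++ [x]) (min b (min x (c + x))) (min x (c + x)) hc' hcu' hb' hbu'
    simpa [List.append_assoc] using h

lemma kadMax_spec (l : List Int) (hl : l ≠ []) :
    SubS l (kadMax l) ∧ ∀ v, SubS l v → v ≤ kadMax l := by
  obtain ⟨a, rest, rfl⟩ : ∃ a rest, l = a :: rest := by
    cases l with
    | nil => exact absurd rfl hl
    | cons a r => exact ⟨a, r, rfl⟩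
  have h := kadMax_fold rest [a] a a
    ⟨0, by simp, by simp⟩
    (by rintro v ⟨k, hk, rfl⟩
        have hk0 : k = 0 := by simpa using hk
        subst hk0; simp)
    ⟨0, 1, le_refl _, by simp, by simp⟩
    (by rintro v ⟨i, m, hm, hlen, rfl⟩
        simp only [List.length_cons, List.length_nil] at hlen
        have hi : i = 0 := by omega
        have hm1 : m = 1 := by omega
        subst hi; subst hm1; simp)
  simp only [List.singleton_append] at h
  exact ⟨by simpa [kadMax] using h.2.2.1, by
    intro v hv
    have h2 := h.2.2.2 v hv
    simpa [kadMax] using h2⟩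

lemma kadMin_spec (l : List Int) (hl : l ≠ []) :
    SubS l (kadMin l) ∧ ∀ v, SubS l v → kadMin l ≤ v := by
  obtain ⟨a, rest, rfl⟩ : ∃ a rest, l = a :: rest := by
    cases l with
    | nil => exact absurd rfl hl
    | cons a r => exact ⟨a, r, rfl⟩
  have h := kadMin_fold rest [a] a a
    ⟨0, by simp, by simp⟩
    (by rintro v ⟨k, hk, rfl⟩
        have hk0 : k = 0 := by simpa using hk
        subst hk0; simp)
    ⟨0, 1, le_refl _, by simp, by simp⟩
    (by rintro v ⟨i, m, hm, hlen, rfl⟩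
        simp only [List.length_cons, List.length_nil] at hlen
        have hi : i = 0 := by omega
        have hm1 : m = 1 := by omega
        subst hi; subst hm1; simp)
  simp only [List.singleton_append] at h
  exact ⟨by simpa [kadMin] using h.2.2.1, by
    intro v hv
    have h2 := h.2.2.2 v hv
    simpa [kadMin] using h2⟩

lemma S_diag (P : List Int) (i : Nat) (hi : i < P.length) : S P i i = P.getD i 0 := by
  unfold S
  have h1 : i + 1 - i = 1 := by omega
  rw [h1, List.drop_eq_getElem_cons hi]
  have h2 : (P[i] :: P.drop (i + 1)).take 1 = [P[i]] := rfl
  rw [h2]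
  simp [List.getD_eq_getElem?_getD, List.getElem?_eq_getElem hi]

lemma S_succ_col (P : List Int) (i j : Nat) (hij : i ≤ j) (hj : j + 1 < P.length) :
    S P i (j + 1) = S P i j + P.getD (j + 1) 0 := by
  unfold S
  have h1 : j + 1 + 1 - i = (j + 1 - i) + 1 := by omega
  rw [h1, List.take_succ]
  have h2 : (P.drop i)[j + 1 - i]? = some (P[j + 1]'hj) := by
    rw [List.getElem?_drop]
    have h3 : i + (j + 1 - i) = j + 1 := by omega
    rw [h3, List.getElem?_eq_getElem hj]
  rw [h2]
  simp [List.getD_eq_getElem?_getD, List.getElem?_eq_getElem hj]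

lemma x0_eq_S00 (P : List Int) (hP : P ≠ []) : PySem.List.pyGetD P 0 0 = S P 0 0 := by
  cases P with
  | nil => exact absurd rfl hP
  | cons p t => simp [S, PySem.List.pyGetD_zero_cons]

lemma mxSet_mono (P : List Int) (j i : Nat) (v : Int) (h : MxSet P j i v) :
    MxSet P j (i + 1) v := by
  rcases h with h | ⟨a, b, h1, h2, h3, h4⟩
  · exact Or.inl h
  · exact Or.inr ⟨a, b, h1, by omega, h3, h4⟩

lemma mx_update (P : List Int) (j i : Nat) (hij : i ≤ j) (hj : j < P.length) (mx : Int)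
    (h1 : MxSet P j i mx) (h2 : ∀ v, MxSet P j i v → v ≤ mx) :
    MxSet P j (i + 1) (if ¬(i = 0 ∧ j = P.length - 1) then
        (if S P i j > mx then S P i j else mx) else mx) ∧
    ∀ v, MxSet P j (i + 1) v → v ≤ (if ¬(i = 0 ∧ j = P.length - 1) then
        (if S P i j > mx then S P i j else mx) else mx) := by
  by_cases hexc : i = 0 ∧ j = P.length - 1
  · rw [if_neg (not_not_intro hexc)]
    refine ⟨mxSet_mono P j i mx h1, ?_⟩
    rintro v (h | ⟨a, b, hab, hbj, hne, rfl⟩)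
    · exact h2 v (Or.inl h)
    · by_cases hcur : b = j ∧ a = i
      · exact absurd ⟨by omega, by omega⟩ hne
      · exact h2 _ (Or.inr ⟨a, b, hab, by omega, hne, rfl⟩)
  · rw [if_pos hexc]
    constructor
    · by_cases hgt : S P i j > mx
      · rw [if_pos hgt]
        exact Or.inr ⟨i, j, hij, Or.inr ⟨rfl, Nat.lt_succ_self i⟩, hexc, rfl⟩
      · rw [if_neg hgt]
        exact mxSet_mono P j i mx h1
    · rintro v (h | ⟨a, b, hab, hbj, hne, rfl⟩)
      · have h3 := h2 v (Or.inl h)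
        split_ifs <;> omega
      · by_cases hcur : b = j ∧ a = i
        · have hSv : S P a b = S P i j := by rw [hcur.1, hcur.2]
          rw [hSv]
          split_ifs <;> omega
        · have h3 := h2 _ (Or.inr ⟨a, b, hab, by omega, hne, rfl⟩)
          split_ifs <;> omega

lemma mnSet_mono (P : List Int) (j i : Nat) (v : Int) (h : MnSet P j i v) :
    MnSet P j (i + 1) v := by
  rcases h with h | ⟨a, b, h1, h2, h4⟩
  · exact Or.inl h
  · exact Or.inr ⟨a, b, h1, by omega, h4⟩

lemma mn_update (P : List Int) (j i : Nat) (hij : i ≤ j) (hj : j < P.length) (mn : Int)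
    (h1 : MnSet P j i mn) (h2 : ∀ v, MnSet P j i v → mn ≤ v) :
    MnSet P j (i + 1) (if S P i j < mn then S P i j else mn) ∧
    ∀ v, MnSet P j (i + 1) v → (if S P i j < mn then S P i j else mn) ≤ v := by
  constructor
  · by_cases hlt : S P i j < mn
    · rw [if_pos hlt]
      exact Or.inr ⟨i, j, hij, Or.inr ⟨rfl, Nat.lt_succ_self i⟩, rfl⟩
    · rw [if_neg hlt]
      exact mnSet_mono P j i mn h1
  · rintro v (h | ⟨a, b, hab, hbj, rfl⟩)
    · have h3 := h2 v (Or.inl h)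
      split_ifs <;> omega
    · by_cases hcur : b = j ∧ a = i
      · have hSv : S P a b = S P i j := by rw [hcur.1, hcur.2]
        rw [hSv]
        split_ifs <;> omega
      · have h3 := h2 _ (Or.inr ⟨a, b, hab, by omega, rfl⟩)
        split_ifs <;> omega

lemma delishInner_step (P : List Int) (j i : Nat) (hij : i ≤ j) (hj : j < P.length)
    (st : List (List Int) × Int × Int) (h : InvA P j i st) :
    InvA P j (i + 1) (delishInner P.length P j st i) := by
  obtain ⟨hdp, hmx1, hmx2, hmn1, hmn2⟩ := h
  have hi : i < P.length := lt_of_le_of_lt hij hj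
  have hrow : st.1.getD i [] = (List.range P.length).map (fun b =>
      if (b < j ∨ (b = j ∧ i < i)) ∧ i ≤ b then S P i b else 0) := by
    rw [hdp]
    unfold dpAt
    rw [List.getD_eq_getElem?_getD, List.getElem?_map, List.getElem?_range hi]
    rfl
  have hRj : ((List.range P.length).map (fun b =>
      if (b < j ∨ (b = j ∧ i < i)) ∧ i ≤ b then S P i b else 0)).getD j 0 = 0 := by
    rw [List.getD_eq_getElem?_getD, List.getElem?_map, List.getElem?_range hj]
    simp only [Option.map_some, Option.getD_some]
    rw [if_neg (by omega)]
  have hv : PySem.List.pyGetD (st.1.getD i []) (↑j) 0 +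
      (PySem.List.pyGetD P (↑j) 0 + PySem.List.pyGetD (st.1.getD i []) (↑j - 1) 0)
      = S P i j := by
    rw [hrow]
    simp only [PySem.List.pyGetD_natCast]
    rw [hRj]
    cases j with
    | zero =>
      have hi0 : i = 0 := by omega
      subst hi0
      have hm1 : ((0 : Nat) : Int) - 1 = -1 := by norm_num
      rw [hm1]
      have hne : ((List.range P.length).map (fun b =>
          if (b < 0 ∨ (b = 0 ∧ (0 : Nat) < 0)) ∧ 0 ≤ b then S P 0 b else 0)) ≠ [] := by
        simp only [ne_eq, List.map_eq_nil_iff, List.range_eq_nil]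
        omega
      rw [PySem.List.pyGetD_neg_one _ _ hne, List.getLast_eq_getElem]
      simp only [List.length_map, List.length_range, List.getElem_map, List.getElem_range]
      rw [if_neg (by omega), S_diag P 0 hj]
      ring
    | succ k =>
      have hm1 : ((k + 1 : Nat) : Int) - 1 = ((k : Nat) : Int) := by push_cast; ring
      rw [hm1, PySem.List.pyGetD_natCast]
      have hk : k < P.length := by omega
      have hRk : ((List.range P.length).map (fun b =>
          if (b < k + 1 ∨ (b = k + 1 ∧ i < i)) ∧ i ≤ b then S P i b else 0)).getD k 0 =
          if (k < k + 1 ∨ (k = k + 1 ∧ i < i)) ∧ i ≤ k then S P i k else 0 := by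
        rw [List.getD_eq_getElem?_getD, List.getElem?_map, List.getElem?_range hk]
        simp only [Option.map_some, Option.getD_some]
      rw [hRk]
      by_cases hik : i ≤ k
      · rw [if_pos ⟨Or.inl (by omega), hik⟩, S_succ_col P i k hik hj]
        ring
      · rw [if_neg (by omega)]
        have hieq : i = k + 1 := by omega
        subst hieq
        rw [S_diag P (k + 1) hj]
        ring
  have hdpnew : (dpAt P j i).set i ((((List.range P.length).map (fun b =>
      if (b < j ∨ (b = j ∧ i < i)) ∧ i ≤ b then S P i b else 0))).set j (S P i j))
      = dpAt P j (i + 1) := by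
    apply List.ext_getElem
    · simp [dpAt]
    · intro a ha1 ha2
      rw [List.getElem_set]
      by_cases hai : i = a
      · rw [if_pos hai]
        subst hai
        simp only [dpAt, List.getElem_map, List.getElem_range]
        apply List.ext_getElem
        · simp
        · intro b hb1 hb2
          rw [List.getElem_set]
          simp only [List.getElem_map, List.getElem_range]
          by_cases hbj : j = b
          · rw [if_pos hbj]
            subst hbj
            rw [if_pos ⟨Or.inr ⟨rfl, Nat.lt_succ_self i⟩, hij⟩]
          · rw [if_neg hbj]
            split_ifs <;> first | rfl | omega
      · rw [if_neg hai]
        simp only [dpAt, List.getElem_map, List.getElem_range]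
        apply List.ext_getElem
        · simp
        · intro b hb1 hb2
          simp only [List.getElem_map, List.getElem_range]
          split_ifs <;> first | rfl | omega
  have hstep : delishInner P.length P j st i =
      (dpAt P j (i + 1),
       if ¬(i = 0 ∧ j = P.length - 1) then
         (if S P i j > st.2.1 then S P i j else st.2.1) else st.2.1,
       if S P i j < st.2.2 then S P i j else st.2.2) := by
    simp only [delishInner]
    rw [hv, hrow, hdp, hdpnew]
  rw [hstep]
  exact ⟨rfl,
    (mx_update P j i hij hj st.2.1 hmx1 hmx2).1,
    (mx_update P j i hij hj st.2.1 hmx1 hmx2).2,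
    (mn_update P j i hij hj st.2.2 hmn1 hmn2).1,
    (mn_update P j i hij hj st.2.2 hmn1 hmn2).2⟩

lemma innerA (P : List Int) (j : Nat) (hj : j < P.length) :
    ∀ m, m ≤ j + 1 → ∀ st, InvA P j 0 st →
      InvA P j m ((List.range m).foldl (delishInner P.length P j) st) := by
  intro m
  induction m with
  | zero => intro _ st h; simpa using h
  | succ m ih =>
    intro hm st h
    rw [List.range_succ, List.foldl_append, List.foldl_cons, List.foldl_nil]
    exact delishInner_step P j m (by omega) hj _ (ih (by omega) st h)

lemma invA_roll (P : List Int) (j : Nat) (st : List (List Int) × Int × Int)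
    (h : InvA P j (j + 1) st) : InvA P (j + 1) 0 st := by
  obtain ⟨hdp, a1, a2, a3, a4⟩ := h
  have hdp2 : dpAt P j (j + 1) = dpAt P (j + 1) 0 := by
    unfold dpAt
    apply List.ext_getElem
    · simp
    · intro a ha1 ha2
      simp only [List.getElem_map, List.getElem_range]
      apply List.ext_getElem
      · simp
      · intro b hb1 hb2
        simp only [List.getElem_map, List.getElem_range]
        split_ifs <;> first | rfl | omega
  have hmx : ∀ v, MxSet P j (j + 1) v ↔ MxSet P (j + 1) 0 v := by
    intro v
    constructor
    · rintro (h | ⟨a, b, h1, h2, h3, h4⟩)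
      · exact Or.inl h
      · exact Or.inr ⟨a, b, h1, by omega, h3, h4⟩
    · rintro (h | ⟨a, b, h1, h2, h3, h4⟩)
      · exact Or.inl h
      · exact Or.inr ⟨a, b, h1, by omega, h3, h4⟩
  have hmn : ∀ v, MnSet P j (j + 1) v ↔ MnSet P (j + 1) 0 v := by
    intro v
    constructor
    · rintro (h | ⟨a, b, h1, h2, h4⟩)
      · exact Or.inl h
      · exact Or.inr ⟨a, b, h1, by omega, h4⟩
    · rintro (h | ⟨a, b, h1, h2, h4⟩)
      · exact Or.inl h
      · exact Or.inr ⟨a, b, h1, by omega, h4⟩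
  exact ⟨hdp.trans hdp2, (hmx _).1 a1, fun v hv => a2 v ((hmx v).2 hv),
    (hmn _).1 a3, fun v hv => a4 v ((hmn v).2 hv)⟩

lemma outerA (P : List Int) : ∀ m, m ≤ P.length →
    InvA P m 0 ((List.range m).foldl
      (fun st j => (List.range (j + 1)).foldl (delishInner P.length P j) st)
      ((List.range P.length).map fun _ => (List.range P.length).map fun _ => (0 : Int),
       PySem.List.pyGetD P 0 0, PySem.List.pyGetD P 0 0)) := by
  intro m
  induction m with
  | zero =>
    intro _
    simp only [List.range_zero, List.foldl_nil]
    refine ⟨?_, Or.inl rfl, ?_, Or.inl rfl, ?_⟩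
    · unfold dpAt
      apply List.map_congr_left
      intro a _
      apply List.map_congr_left
      intro b _
      rw [if_neg (by omega)]
    · rintro v (rfl | ⟨a, b, h1, h2, h3, rfl⟩)
      · exact le_refl _
      · exact absurd h2 (by omega)
    · rintro v (rfl | ⟨a, b, h1, h2, rfl⟩)
      · exact le_refl _
      · exact absurd h2 (by omega)
  | succ m ih =>
    intro hm
    rw [List.range_succ, List.foldl_append, List.foldl_cons, List.foldl_nil]
    exact invA_roll P m _ (innerA P m (by omega) (m + 1) (le_refl _) _ (ih (by omega)))

lemma subS_tail (P : List Int) (v : Int) :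
    SubS P.tail v ↔ ∃ a b, 1 ≤ a ∧ a ≤ b ∧ b < P.length ∧ v = S P a b := by
  unfold SubS S
  constructor
  · rintro ⟨i, m, hm, hlen, rfl⟩
    rw [List.length_tail] at hlen
    refine ⟨i + 1, i + m, by omega, by omega, by omega, ?_⟩
    have h1 : i + m + 1 - (i + 1) = m := by omega
    rw [h1, ← List.drop_one, List.drop_drop, Nat.add_comm 1 i]
  · rintro ⟨a, b, h0, h1, h2, rfl⟩
    refine ⟨a - 1, b + 1 - a, by omega, by rw [List.length_tail]; omega, ?_⟩
    rw [← List.drop_one, List.drop_drop]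
    have h3 : 1 + (a - 1) = a := by omega
    rw [h3]

lemma subS_dropLast (P : List Int) (v : Int) :
    SubS P.dropLast v ↔ ∃ a b, a ≤ b ∧ b + 1 < P.length ∧ v = S P a b := by
  unfold SubS S
  constructor
  · rintro ⟨i, m, hm, hlen, rfl⟩
    rw [List.length_dropLast] at hlen
    refine ⟨i, i + m - 1, by omega, by omega, ?_⟩
    rw [List.dropLast_eq_take, List.drop_take, List.take_take]
    have h1 : i + m - 1 + 1 - i = m := by omega
    rw [h1, Nat.min_eq_left (by omega)]
  · rintro ⟨a, b, h1, h2, rfl⟩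
    refine ⟨a, b + 1 - a, by omega, by rw [List.length_dropLast]; omega, ?_⟩
    rw [List.dropLast_eq_take, List.drop_take, List.take_take,
      Nat.min_eq_left (by omega)]

lemma mnSet_iff_subS (P : List Int) (hP : P ≠ []) (v : Int) :
    MnSet P P.length 0 v ↔ SubS P v := by
  have hlen : 0 < P.length := List.length_pos_iff.mpr hP
  constructor
  · rintro (rfl | ⟨a, b, h1, h2, rfl⟩)
    · refine ⟨0, 1, le_refl _, by omega, ?_⟩
      rw [x0_eq_S00 P hP]
      rfl
    · have hb : b < P.length := by omega
      exact ⟨a, b + 1 - a, by omega, by omega, by unfold S; rfl⟩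
  · rintro ⟨i, m, hm, hlen2, rfl⟩
    right
    refine ⟨i, i + m - 1, by omega, by omega, ?_⟩
    unfold S
    have h1 : i + m - 1 + 1 - i = m := by omega
    rw [h1]

lemma mxSet_iff (P : List Int) (h2 : 2 ≤ P.length) (v : Int) :
    MxSet P P.length 0 v ↔ (SubS P.tail v ∨ SubS P.dropLast v) := by
  have hP : P ≠ [] := by
    intro h
    rw [h] at h2
    simp at h2
  constructor
  · rintro (rfl | ⟨a, b, hab, hb, hne, rfl⟩)
    · right
      exact (subS_dropLast P _).2 ⟨0, 0, le_refl _, by omega, x0_eq_S00 P hP⟩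
    · have hb' : b < P.length := by omega
      by_cases ha : a = 0
      · subst ha
        right
        exact (subS_dropLast P _).2 ⟨0, b, by omega, by omega, rfl⟩
      · left
        exact (subS_tail P _).2 ⟨a, b, by omega, hab, hb', rfl⟩
  · rintro (h | h)
    · obtain ⟨a, b, h0, h1, hb, rfl⟩ := (subS_tail P _).1 h
      exact Or.inr ⟨a, b, h1, by omega, by omega, rfl⟩
    · obtain ⟨a, b, h1, hb, rfl⟩ := (subS_dropLast P _).1 h
      exact Or.inr ⟨a, b, h1, by omega, by omega, rfl⟩

-- ===== VERDICT (by name: the statement is the Claim_ definition above) =====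
theorem delish_spec : Claim_equal_delish := by
  unfold Claim_equal_delish
  intro P _ hpre
  have hP : P ≠ [] := hpre
  have hlen : 0 < P.length := List.length_pos_iff.mpr hP
  unfold Spec_delish
  obtain ⟨hdp, hmx1, hmx2, hmn1, hmn2⟩ := outerA P P.length (le_refl _)
  have hd : delish P = ((List.range P.length).foldl
      (fun st j => (List.range (j + 1)).foldl (delishInner P.length P j) st)
      ((List.range P.length).map fun _ => (List.range P.length).map fun _ => (0 : Int),
       PySem.List.pyGetD P 0 0, PySem.List.pyGetD P 0 0)).2.1 -
      ((List.range P.length).foldl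
      (fun st j => (List.range (j + 1)).foldl (delishInner P.length P j) st)
      ((List.range P.length).map fun _ => (List.range P.length).map fun _ => (0 : Int),
       PySem.List.pyGetD P 0 0, PySem.List.pyGetD P 0 0)).2.2 := rfl
  rw [hd]
  clear hdp hd
  generalize hFF : ((List.range P.length).foldl
      (fun st j => (List.range (j + 1)).foldl (delishInner P.length P j) st)
      ((List.range P.length).map fun _ => (List.range P.length).map fun _ => (0 : Int),
       PySem.List.pyGetD P 0 0, PySem.List.pyGetD P 0 0)) = F at hmx1 hmx2 hmn1 hmn2 ⊢
  clear hFF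
  rcases Nat.lt_or_ge P.length 2 with hsmall | hbig
  · have h1 : P.length = 1 := by omega
    have hmxv : F.2.1 = PySem.List.pyGetD P 0 0 := by
      rcases hmx1 with h | ⟨a, b, hab, hbj, hne, heq⟩
      · exact h
      · exact absurd ⟨by omega, by omega⟩ hne
    have hmnv : F.2.2 = PySem.List.pyGetD P 0 0 := by
      rcases hmn1 with h | ⟨a, b, hab, hbj, heq⟩
      · exact h
      · have ha : a = 0 := by omega
        have hb : b = 0 := by omega
        rw [heq, ha, hb, ← x0_eq_S00 P hP]
    rw [hmxv, hmnv]
    unfold delish_alt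
    rw [if_pos h1]
    ring
  · have htail : P.tail ≠ [] := by
      apply List.ne_nil_of_length_pos
      rw [List.length_tail]
      omega
    have hdl : P.dropLast ≠ [] := by
      apply List.ne_nil_of_length_pos
      rw [List.length_dropLast]
      omega
    obtain ⟨kt1, kt2⟩ := kadMax_spec P.tail htail
    obtain ⟨kd1, kd2⟩ := kadMax_spec P.dropLast hdl
    obtain ⟨km1, km2⟩ := kadMin_spec P hP
    have hmx_eq : F.2.1 = max (kadMax P.tail) (kadMax P.dropLast) := by
      apply le_antisymm
      · rcases (mxSet_iff P hbig _).1 hmx1 with h | h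
        · exact le_trans (kt2 _ h) (le_max_left _ _)
        · exact le_trans (kd2 _ h) (le_max_right _ _)
      · exact max_le (hmx2 _ ((mxSet_iff P hbig _).2 (Or.inl kt1)))
          (hmx2 _ ((mxSet_iff P hbig _).2 (Or.inr kd1)))
    have hmn_eq : F.2.2 = kadMin P := by
      apply le_antisymm
      · exact hmn2 _ ((mnSet_iff_subS P hP _).2 km1)
      · exact km2 _ ((mnSet_iff_subS P hP _).1 hmn1)
    rw [hmx_eq, hmn_eq]
    unfold delish_alt
    rw [if_neg (by omega)]
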